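-- pv_equiv track=rewrite | github.com/Luciano-amax/cuatroenlinea | anexo.py | completarTableroEnOrden
-- ===== SOURCE A (Python) =====
-- def soltarFichaEnColumna(ficha,columna,tablero):
--     for fila in range(6,0,-1):
--         if tablero[fila-1][columna-1]==0:
--             tablero[fila-1][columna-1]=ficha
--             return
--
-- def completarTableroEnOrden(secuencia,tablero):
--     ficha = 1
--     for juga in secuencia:
--         soltarFichaEnColumna(ficha,juga,tablero)
--         if ficha==1:
--             ficha=2
--         else:
--             ficha=1
--     return tablero
-- ===== SOURCE B (Python) =====
-- def completarTableroEnOrden(secuencia, tablero):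
--     if not secuencia:
--         return tablero
--     columnas = len(tablero[0])
--     # per column: the empty row indices, top to bottom; pop() yields the lowest empty cell
--     vacias = [[fila for fila in range(6) if tablero[fila][col] == 0]
--               for col in range(columnas)]
--     ficha = 1
--     for juga in secuencia:
--         huecos = vacias[juga - 1]
--         if huecos:
--             tablero[huecos.pop()][juga - 1] = ficha
--         ficha = 2 if ficha == 1 else 1
--     return tablero
-- ===== Notes on version B (the rewrite author's own statement) =====
-- stated objective: alternative
-- what changed: B scans the board once to build, per column, a stack of empty row indices and then pops one index per move, instead of A's per-move rescan of the six rows of the played column; Pre_ excludes boards with fewer than 6 rows or ragged/invalid widths for the played columns, where A raises IndexError or its result depends on which rows it happens to index.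
import Mathlib
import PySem

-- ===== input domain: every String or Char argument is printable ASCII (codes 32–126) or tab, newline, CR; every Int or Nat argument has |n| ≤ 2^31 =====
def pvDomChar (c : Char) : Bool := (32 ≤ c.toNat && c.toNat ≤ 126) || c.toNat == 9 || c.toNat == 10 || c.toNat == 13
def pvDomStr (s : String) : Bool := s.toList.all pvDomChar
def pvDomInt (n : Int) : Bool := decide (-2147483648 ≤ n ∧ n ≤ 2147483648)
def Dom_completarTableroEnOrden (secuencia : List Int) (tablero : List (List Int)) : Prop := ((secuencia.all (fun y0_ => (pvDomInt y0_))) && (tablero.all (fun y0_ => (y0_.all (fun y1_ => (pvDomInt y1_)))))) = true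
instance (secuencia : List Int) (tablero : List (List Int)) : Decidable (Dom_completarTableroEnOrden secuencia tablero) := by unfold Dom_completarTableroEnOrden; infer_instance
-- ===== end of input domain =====

-- B replaces A's per-move 6-row rescans by one per-column stack of empty row indices built in a single
-- scan of the board (objective: alternative).
-- Python A (and B) mutate `tablero` in place and return it; the equivalence proved here is about the
-- returned value (both perform the same in-place writes).

-- ===== PORT A =====
-- the `for fila in range(6,0,-1)` loop of soltarFichaEnColumna; the pyGetD defaults are unreachable under Pre_
def pvSFLoop (ficha columna : Int) (filas : List Int) (tablero : List (List Int)) : List (List Int) :=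
  match filas with
  | [] => tablero
  | fila :: rest =>
    if PySem.List.pyGetD (PySem.List.pyGetD tablero (fila - 1) []) (columna - 1) 1 = 0 then
      PySem.List.pySetD tablero (fila - 1)
        (PySem.List.pySetD (PySem.List.pyGetD tablero (fila - 1) []) (columna - 1) ficha)
    else pvSFLoop ficha columna rest tablero

def soltarFichaEnColumna (ficha columna : Int) (tablero : List (List Int)) : List (List Int) :=
  pvSFLoop ficha columna (PySem.List.pyRange 6 0 (-1)) tablero

def completarTableroEnOrden (secuencia : List Int) (tablero : List (List Int)) : List (List Int) :=
  (secuencia.foldl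
    (fun (st : Int × List (List Int)) juga =>
      (if st.1 = 1 then (2 : Int) else 1, soltarFichaEnColumna st.1 juga st.2))
    ((1 : Int), tablero)).2

-- ===== PORT B =====
-- loop body of Source B's `for juga in secuencia`; state = (ficha, vacias, tablero);
-- huecos.pop() = last element, removed; the pyGetD/getD defaults are unreachable under Pre_
def pvAltStep (st : Int × List (List Nat) × List (List Int)) (juga : Int) :
    Int × List (List Nat) × List (List Int) :=
  let huecos := PySem.List.pyGetD st.2.1 (juga - 1) []
  let st' :=
    match huecos.getLast? with
    | none => (st.2.1, st.2.2)
    | some r =>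
        (PySem.List.pySetD st.2.1 (juga - 1) huecos.dropLast,
         st.2.2.set r (PySem.List.pySetD (st.2.2.getD r []) (juga - 1) st.1))
  (if st.1 = 1 then (2 : Int) else 1, st'.1, st'.2)

def completarTableroEnOrden_alt (secuencia : List Int) (tablero : List (List Int)) : List (List Int) :=
  match secuencia with
  | [] => tablero
  | _ :: _ =>
    let columnas := (tablero.getD 0 []).length
    let vacias := (List.range columnas).map
      (fun col => (List.range 6).filter (fun fila => (tablero.getD fila []).getD col 1 = 0))
    (secuencia.foldl pvAltStep (1, vacias, tablero)).2.2

-- ===== PRECONDITION & SPEC =====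
-- Pre_ excludes inputs where A raises (fewer than 6 rows, or a move whose column index is invalid in
-- some row A scans), and — because WHICH rows A indexes depends on the board's contents — it states
-- the closed form for a proper board: the six played rows have one common width and every move's
-- column index is valid for that width.  This excludes some ragged boards on which A happens to
-- return (see claim cites).
def Pre_completarTableroEnOrden (secuencia : List Int) (tablero : List (List Int)) : Prop :=
  secuencia ≠ [] →
    (6 ≤ tablero.length ∧
     (∀ r ∈ List.range 6, (tablero.getD r []).length = (tablero.getD 0 []).length) ∧
     ∀ j ∈ secuencia, PySem.Raise.InRange (tablero.getD 0 []).length (j - 1))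
instance (secuencia : List Int) (tablero : List (List Int)) : Decidable (Pre_completarTableroEnOrden secuencia tablero) := by unfold Pre_completarTableroEnOrden; infer_instance

def pvWitness_completarTableroEnOrden : List Int × List (List Int) :=
  ([1, 2, 0, 1], [[0, 0], [0, 0], [0, 0], [0, 0], [0, 5], [0, 0]])

def Spec_completarTableroEnOrden (secuencia : List Int) (tablero : List (List Int)) (out : List (List Int)) : Prop := out = completarTableroEnOrden_alt secuencia tablero
instance (secuencia : List Int) (tablero : List (List Int)) (out : List (List Int)) : Decidable (Spec_completarTableroEnOrden secuencia tablero out) := by unfold Spec_completarTableroEnOrden; infer_instance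

-- ===== CLAIM (what is proved, stated in full; the proofs are below) =====
def Claim_equal_completarTableroEnOrden : Prop := ∀ (secuencia : List Int) (tablero : List (List Int)), Dom_completarTableroEnOrden secuencia tablero → Pre_completarTableroEnOrden secuencia tablero → Spec_completarTableroEnOrden secuencia tablero (completarTableroEnOrden secuencia tablero)

-- ===== LEMMAS AND PROOFS =====

-- the empty rows of column c, bottom-most last (what B's per-column stacks hold)
def pvColE (t : List (List Int)) (c : Nat) : List Nat :=
  (List.range 6).filter (fun r => (t.getD r []).getD c 1 = 0)

-- board shape invariant: at least the six played rows, all of width w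
def pvShape (t : List (List Int)) (w : Nat) : Prop :=
  6 ≤ t.length ∧ ∀ r : Nat, r < 6 → (t.getD r []).length = w

lemma pv_emod_neg (i b : Int) (h1 : -b ≤ i) (h : i < 0) : i % b = i + b := by
  have h2 : (i + b) % b = i + b := Int.emod_eq_of_lt (by omega) (by omega)
  have h3 : (i + b * 1) % b = i % b := Int.add_mul_emod_self_left i b 1
  simp only [mul_one] at h3
  omega

lemma pv_pyGetD_mod {α : Type} (xs : List α) (i : Int) (d : α)
    (h1 : -(xs.length : Int) ≤ i) (h2 : i < xs.length) :
    PySem.List.pyGetD xs i d = xs.getD (PySem.Int.mod i xs.length).toNat d := by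
  have hw : 0 < (xs.length : Int) := by omega
  have hm : PySem.Int.mod i xs.length = i % xs.length := PySem.Int.mod_eq_emod_of_pos hw
  by_cases h : 0 ≤ i
  · have he : i % (xs.length : Int) = i := Int.emod_eq_of_lt h h2
    rw [PySem.List.pyGetD_eq_getElem xs d h h2, hm, he, List.getD_eq_getElem]
  · have he : i % (xs.length : Int) = i + xs.length := pv_emod_neg i _ h1 (by omega)
    rw [hm, he]
    have ht : (i + (xs.length : Int)).toNat = xs.length - (-i).toNat := by omega
    rw [ht]
    have hk : i = -(((-i).toNat : Nat) : Int) := by omega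
    conv_lhs => rw [hk]
    rw [PySem.List.pyGetD_neg_natCast xs (-i).toNat d (by omega) (by omega), List.getD_eq_getElem]

lemma pv_pySetD_mod {α : Type} (xs : List α) (i : Int) (v : α)
    (h1 : -(xs.length : Int) ≤ i) (h2 : i < xs.length) :
    PySem.List.pySetD xs i v = xs.set (PySem.Int.mod i xs.length).toNat v := by
  have hw : 0 < (xs.length : Int) := by omega
  have hm : PySem.Int.mod i xs.length = i % xs.length := PySem.Int.mod_eq_emod_of_pos hw
  simp only [PySem.List.pySetD, PySem.List.pySet?, PySem.List.pyIdx?, hm]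
  by_cases h : 0 ≤ i
  · have he : i % (xs.length : Int) = i := Int.emod_eq_of_lt h h2
    simp [h, h2, he]
  · have he : i % (xs.length : Int) = i + xs.length := pv_emod_neg i _ h1 (by omega)
    have ht : (i + (xs.length : Int)).toNat = xs.length - (-i).toNat := by omega
    simp [h, h1, he, ht]

-- A's scan from row 6 down to 1 finds exactly the LAST element of pvColE (bottom-most empty row)
lemma pvDropA (f j : Int) (t : List (List Int)) (w : Nat)
    (hs : pvShape t w) (hj : PySem.Raise.InRange w (j - 1)) :
    soltarFichaEnColumna f j t =
      match (pvColE t ((PySem.Int.mod (j - 1) (w : Int)).toNat)).getLast? with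
      | none => t
      | some r => t.set r ((t.getD r []).set ((PySem.Int.mod (j - 1) (w : Int)).toNat) f) := by
  obtain ⟨h6, hrow⟩ := hs
  obtain ⟨hj1, hj2⟩ := hj
  have hw : 0 < w := by omega
  have hlen : (6 : Int) ≤ t.length := by exact_mod_cast h6
  set c : Nat := (PySem.Int.mod (j - 1) (w : Int)).toNat with hc
  have grow : ∀ i : Int, 0 ≤ i → i < 6 → PySem.List.pyGetD t i [] = t.getD i.toNat [] := by
    intro i h0 h6'
    rw [PySem.List.pyGetD_eq_getElem t [] h0 (by omega), List.getD_eq_getElem]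
  have gcol : ∀ xs : List Int, xs.length = w →
      PySem.List.pyGetD xs (j - 1) 1 = xs.getD c 1 := by
    intro xs hxl
    rw [pv_pyGetD_mod xs (j - 1) 1 (by rw [hxl]; exact hj1) (by rw [hxl]; exact hj2), hxl]
  have gset : ∀ xs : List Int, xs.length = w →
      PySem.List.pySetD xs (j - 1) f = xs.set c f := by
    intro xs hxl
    rw [pv_pySetD_mod xs (j - 1) f (by rw [hxl]; exact hj1) (by rw [hxl]; exact hj2), hxl]
  have hrange : PySem.List.pyRange 6 0 (-1) = [6, 5, 4, 3, 2, 1] := by decide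
  unfold soltarFichaEnColumna
  rw [hrange]
  simp only [pvSFLoop]
  norm_num
  rw [grow 5 (by norm_num) (by norm_num), grow 4 (by norm_num) (by norm_num),
      grow 3 (by norm_num) (by norm_num), grow 2 (by norm_num) (by norm_num),
      grow 1 (by norm_num) (by norm_num), grow 0 (by norm_num) (by norm_num)]
  simp only [show Int.toNat 5 = 5 from rfl, show Int.toNat 4 = 4 from rfl,
    show Int.toNat 3 = 3 from rfl, show Int.toNat 2 = 2 from rfl,
    show Int.toNat 1 = 1 from rfl, show Int.toNat 0 = 0 from rfl]
  rw [gcol _ (hrow 5 (by norm_num)), gcol _ (hrow 4 (by norm_num)), gcol _ (hrow 3 (by norm_num)),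
      gcol _ (hrow 2 (by norm_num)), gcol _ (hrow 1 (by norm_num)), gcol _ (hrow 0 (by norm_num))]
  rw [gset _ (hrow 5 (by norm_num)), gset _ (hrow 4 (by norm_num)), gset _ (hrow 3 (by norm_num)),
      gset _ (hrow 2 (by norm_num)), gset _ (hrow 1 (by norm_num)), gset _ (hrow 0 (by norm_num))]
  rw [PySem.List.pySetD_of_nonneg t _ (by norm_num : (0:Int) ≤ 5),
      PySem.List.pySetD_of_nonneg t _ (by norm_num : (0:Int) ≤ 4),
      PySem.List.pySetD_of_nonneg t _ (by norm_num : (0:Int) ≤ 3),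
      PySem.List.pySetD_of_nonneg t _ (by norm_num : (0:Int) ≤ 2),
      PySem.List.pySetD_of_nonneg t _ (by norm_num : (0:Int) ≤ 1),
      PySem.List.pySetD_of_nonneg t _ (by norm_num : (0:Int) ≤ 0)]
  have hr6 : List.range 6 = [0, 1, 2, 3, 4, 5] := rfl
  by_cases e5 : (t.getD 5 []).getD c 1 = 0 <;>
  by_cases e4 : (t.getD 4 []).getD c 1 = 0 <;>
  by_cases e3 : (t.getD 3 []).getD c 1 = 0 <;>
  by_cases e2 : (t.getD 2 []).getD c 1 = 0 <;>
  by_cases e1 : (t.getD 1 []).getD c 1 = 0 <;>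
  by_cases e0 : (t.getD 0 []).getD c 1 = 0 <;>
    (simp only [List.getD] at e0 e1 e2 e3 e4 e5;
     simp [pvColE, hr6, e0, e1, e2, e3, e4, e5, List.filter])

-- removing the last element of a filter: filter with that element switched off
lemma pvFilterDropLast (l : List Nat) (hnd : l.Nodup) (p p' : Nat → Bool) (r : Nat)
    (h : (l.filter p).getLast? = some r) (hr : p' r = false)
    (hagree : ∀ x, x ≠ r → p' x = p x) : l.filter p' = (l.filter p).dropLast := by
  induction l with
  | nil => simp at h
  | cons a l ih =>
    have hnd' : a ∉ l ∧ l.Nodup := by simpa [List.nodup_cons] using hnd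
    by_cases hpa : p a
    · rcases hfl : l.filter p with _ | ⟨b, bs⟩
      · have hra : r = a := by
          rw [List.filter_cons_of_pos hpa, hfl] at h
          simpa using h.symm
        have : l.filter p' = l.filter p := by
          apply List.filter_congr
          intro x hx
          exact hagree x (fun hxr => hnd'.1 (hra ▸ hxr ▸ hx))
        simp [hra ▸ hr, this, hfl, hpa]
      · have hmem : r ∈ l.filter p := by
          rw [List.filter_cons_of_pos hpa, hfl] at h
          rw [hfl]
          exact List.mem_of_getLast? (by simpa using h)
        have har : a ≠ r := fun hh => hnd'.1 (hh ▸ List.mem_of_mem_filter hmem)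
        have h' : (l.filter p).getLast? = some r := by
          rw [List.filter_cons_of_pos hpa, hfl, List.getLast?_cons_cons] at h
          rw [hfl]; exact h
        rw [List.filter_cons_of_pos hpa, List.filter_cons_of_pos (by rw [hagree a har]; exact hpa),
            ih hnd'.2 h', List.dropLast_cons_of_ne_nil (by rw [hfl]; simp)]
    · have h' : (l.filter p).getLast? = some r := by rwa [List.filter_cons_of_neg hpa] at h
      have hmem : r ∈ l := List.mem_of_mem_filter (List.mem_of_getLast? h')
      have har : a ≠ r := fun hh => hnd'.1 (hh ▸ hmem)
      rw [List.filter_cons_of_neg hpa, List.filter_cons_of_neg (by rw [hagree a har]; exact hpa),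
          ih hnd'.2 h']

-- one move: B's step keeps (vacias, board) in lock-step with A's drop
lemma pvStep (w : Nat) (f : Int) (t : List (List Int)) (hs : pvShape t w)
    (hf : f ≠ 0)
    (j : Int) (hj : PySem.Raise.InRange w (j - 1)) :
    pvAltStep (f, (List.range w).map (pvColE t), t) j
      = (if f = 1 then (2 : Int) else 1,
         (List.range w).map (pvColE (soltarFichaEnColumna f j t)),
         soltarFichaEnColumna f j t)
    ∧ pvShape (soltarFichaEnColumna f j t) w := by
  obtain ⟨h6, hrowlen⟩ := hs
  have hw : 0 < w := by obtain ⟨a, b⟩ := hj; omega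
  set c : Nat := (PySem.Int.mod (j - 1) (w : Int)).toNat with hc
  have hcw : c < w := by
    have m1 := PySem.Int.mod_nonneg (j - 1) (b := (w : Int)) (by exact_mod_cast hw)
    have m2 := PySem.Int.mod_lt (j - 1) (b := (w : Int)) (by exact_mod_cast hw)
    omega
  have hlmap : ((List.range w).map (pvColE t)).length = w := by simp
  have hj' : -(w : Int) ≤ j - 1 ∧ j - 1 < w := hj
  have hget : PySem.List.pyGetD ((List.range w).map (pvColE t)) (j - 1) [] = pvColE t c := by
    rw [pv_pyGetD_mod _ (j - 1) [] (by rw [hlmap]; exact hj'.1) (by rw [hlmap]; exact hj'.2),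
        hlmap, List.getD_eq_getElem _ _ (by simpa using hcw)]
    simp [hc]
  rw [pvDropA f j t w ⟨h6, hrowlen⟩ hj]
  cases hE : (pvColE t c).getLast? with
  | none =>
    constructor
    · simp only [pvAltStep]
      rw [hget, hE]
    · exact ⟨h6, hrowlen⟩
  | some r =>
    have hrmem : r ∈ pvColE t c := List.mem_of_getLast? hE
    have hr6 : r < 6 := List.mem_range.mp (List.mem_filter.mp hrmem).1
    have hcell : (t.getD r []).getD c 1 = 0 := by simpa using (List.mem_filter.mp hrmem).2
    have hrt : r < t.length := by omega
    have hrowl : (t.getD r []).length = w := hrowlen r hr6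
    set t' : List (List Int) := t.set r ((t.getD r []).set c f) with ht'
    have hgd : ∀ x : Nat, x ≠ r → t'.getD x [] = t.getD x [] := by
      intro x hx
      simp [ht', List.getD, List.getElem?_set_ne (Ne.symm hx)]
    have hgr : t'.getD r [] = (t.getD r []).set c f := by
      simp [ht', List.getD, hrt]
    have hshape' : pvShape t' w := by
      refine ⟨by simpa [ht'] using h6, fun x hx => ?_⟩
      by_cases hxr : x = r
      · subst hxr; rw [hgr, List.length_set]; exact hrowl
      · rw [hgd x hxr]; exact hrowlen x hx
    have hcol_c : pvColE t' c = (pvColE t c).dropLast := by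
      apply pvFilterDropLast (List.range 6) List.nodup_range _ _ r hE
      · rw [hgr]
        have : ((t.getD r []).set c f).getD c 1 = f := by
          rw [List.getD_eq_getElem _ _ (by rw [List.length_set, hrowl]; exact hcw)]
          exact List.getElem_set_self (by rw [List.length_set, hrowl]; exact hcw)
        simp only [List.getD] at this
        simp [this, hf]
      · intro x hx
        have hh := hgd x hx
        simp only [List.getD] at hh ⊢
        simp [hh]
    have hcol_ne : ∀ k : Nat, k ≠ c → pvColE t' k = pvColE t k := by
      intro k hk
      apply List.filter_congr
      intro x _
      by_cases hxr : x = r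
      · subst hxr
        rw [hgr]
        simp [List.getD, List.getElem?_set_ne (Ne.symm hk)]
      · rw [hgd x hxr]
    have hmap : (List.range w).map (pvColE t')
        = ((List.range w).map (pvColE t)).set c (pvColE t c).dropLast := by
      apply List.ext_getElem (by simp)
      intro k hk1 hk2
      simp only [List.length_map, List.length_range] at hk1
      by_cases hkc : k = c
      · subst hkc
        rw [List.getElem_set_self (by simpa using hk1)]
        simp [hcol_c]
      · rw [List.getElem_set_ne (Ne.symm hkc)]
        simp [hcol_ne k hkc]
    refine ⟨?_, hshape'⟩
    simp only [pvAltStep]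
    rw [hget, hE, hmap]
    dsimp only
    have hset : PySem.List.pySetD ((List.range w).map (pvColE t)) (j - 1) (pvColE t c).dropLast
        = ((List.range w).map (pvColE t)).set c (pvColE t c).dropLast := by
      rw [pv_pySetD_mod _ (j - 1) _ (by rw [hlmap]; exact hj'.1) (by rw [hlmap]; exact hj'.2), hlmap]
    have hsetrow : PySem.List.pySetD (t.getD r []) (j - 1) f = (t.getD r []).set c f := by
      rw [pv_pySetD_mod _ (j - 1) f (by rw [hrowl]; exact hj'.1) (by rw [hrowl]; exact hj'.2), hrowl]
    rw [hset, hsetrow]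

-- the main loop, in lock-step; the ficha is 1 or 2 throughout, hence never 0
lemma pvLoop (w : Nat) :
    ∀ (seq : List Int) (f : Int) (t : List (List Int)), pvShape t w → f ≠ 0 →
      (∀ j ∈ seq, PySem.Raise.InRange w (j - 1)) →
      (seq.foldl
        (fun (st : Int × List (List Int)) juga =>
          (if st.1 = 1 then (2 : Int) else 1, soltarFichaEnColumna st.1 juga st.2))
        (f, t)).2
      = (seq.foldl pvAltStep (f, (List.range w).map (pvColE t), t)).2.2 := by
  intro seq
  induction seq with
  | nil => intro f t _ _ _; rfl
  | cons j rest ih =>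
    intro f t hs hf hjs
    have hj := hjs j (by simp)
    obtain ⟨hstep, hs'⟩ := pvStep w f t hs hf j hj
    rw [List.foldl_cons, List.foldl_cons, hstep]
    have hf' : (if f = 1 then (2 : Int) else 1) ≠ 0 := by split <;> norm_num
    exact ih _ _ hs' hf' (fun x hx => hjs x (by simp [hx]))

-- ===== VERDICT (by name: the statement is the Claim_ definition above) =====
theorem completarTableroEnOrden_spec : Claim_equal_completarTableroEnOrden := by
  intro secuencia tablero _ hpre
  unfold Spec_completarTableroEnOrden
  cases secuencia with
  | nil => rfl
  | cons j rest =>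
    obtain ⟨h6, hrect, hjs⟩ := hpre (by simp)
    have hs : pvShape tablero (tablero.getD 0 []).length :=
      ⟨h6, fun r hr => hrect r (List.mem_range.mpr hr)⟩
    show (List.foldl _ ((1 : Int), tablero) (j :: rest)).2 = _
    exact pvLoop (tablero.getD 0 []).length (j :: rest) 1 tablero hs (by norm_num) hjs
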